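-- pv_equiv track=rewrite | github.com/snap-research/Panda-70M | captioning/utils/noise_correlation/scripts/compute_covariance_statistics.py | compute_distances
-- ===== SOURCE A (Python) =====
-- def compute_distances(video_height: int, video_width, video_length: int):
--     """
--     Computes the distances to use for sampling covariance pairs
--     """
--     names_to_dictionaries = {}
--     current_distance = 2
--     while current_distance <= video_height:
--         names_to_dictionaries[f"h_{current_distance-1}"] = {"h_space": current_distance-1}
--         current_distance *= 2
--     current_distance = 2
--     while current_distance <= video_width:
--         names_to_dictionaries[f"w_{current_distance-1}"] = {"w_space": current_distance-1}
--         current_distance *= 2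
--     current_distance = 2
--     while current_distance <= video_length:
--         names_to_dictionaries[f"t_{current_distance-1}"] = {"t_space": current_distance-1}
--         current_distance *= 2
--
--     return names_to_dictionaries
-- ===== SOURCE B (Python) =====
-- def compute_distances(video_height: int, video_width, video_length: int):
--     """
--     Computes the distances to use for sampling covariance pairs
--     """
--     def _dists(size):
--         # distances 2^k - 1 for every k >= 1 with 2^k <= size, ascending,
--         # obtained by recursion on halving: d -> 2*d + 1 shifts k by one.
--         if size < 2:
--             return []
--         return [1] + [2 * d + 1 for d in _dists(size // 2)]
--
--     result = {}
--     for prefix, axis, size in (("h", "h_space", video_height),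
--                                ("w", "w_space", video_width),
--                                ("t", "t_space", video_length)):
--         for d in _dists(size):
--             result[f"{prefix}_{d}"] = {axis: d}
--     return result
-- ===== Notes on version B (the rewrite author's own statement) =====
-- stated objective: alternative
-- what changed: Replaces the three copy-pasted while-doubling loops (counter multiplied by 2, inserting counter-1) with a single pass over a (prefix, axis, size) table whose distance list is produced by a recursive halving function: _dists(size) = [] if size < 2 else [1] + [2*d+1 for d in _dists(size//2)], so distances arise from the recurrence d -> 2d+1 on the halved problem instead of a doubling counter.
import Mathlib
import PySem

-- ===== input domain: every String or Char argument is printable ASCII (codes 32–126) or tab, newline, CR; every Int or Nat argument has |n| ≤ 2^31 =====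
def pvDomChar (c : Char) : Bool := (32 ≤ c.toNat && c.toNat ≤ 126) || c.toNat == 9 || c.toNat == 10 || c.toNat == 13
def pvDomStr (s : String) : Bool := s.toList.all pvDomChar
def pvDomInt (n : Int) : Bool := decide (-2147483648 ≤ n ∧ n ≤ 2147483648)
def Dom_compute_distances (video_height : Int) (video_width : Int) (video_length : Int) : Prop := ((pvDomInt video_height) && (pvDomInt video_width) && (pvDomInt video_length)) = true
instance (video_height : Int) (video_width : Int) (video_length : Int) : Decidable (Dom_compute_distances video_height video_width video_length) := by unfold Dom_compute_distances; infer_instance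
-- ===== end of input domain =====

-- B replaces A's three copy-pasted while-doubling loops with one pass over a (prefix, axis,
-- size) table whose distances come from a recursive halving function (objective: alternative).

-- ===== PORT A =====
-- one while-loop of A: while cur <= size: dict[f"{pfx}_{cur-1}"] = {axis: cur-1}; cur *= 2
-- (the loop is only entered with 0 < cur, carried as a hypothesis for termination)
def cdWhile (size : Int) (pfx axis : String)
    (d : PySem.Dict String (List (String × Int))) (cur : Int) (hcur : 0 < cur) :
    PySem.Dict String (List (String × Int)) :=
  if h : cur ≤ size then
    cdWhile size pfx axis
      (d.insert (pfx ++ "_" ++ PySem.Int.toStr (cur - 1)) [(axis, cur - 1)])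
      (cur * 2) (by omega)
  else d
termination_by (size + 1 - cur).toNat
decreasing_by omega

def compute_distances (video_height : Int) (video_width : Int) (video_length : Int) :
    List (String × List (String × Int)) :=
  let d0 : PySem.Dict String (List (String × Int)) := PySem.Dict.empty
  let d1 := cdWhile video_height "h" "h_space" d0 2 (by norm_num)
  let d2 := cdWhile video_width "w" "w_space" d1 2 (by norm_num)
  let d3 := cdWhile video_length "t" "t_space" d2 2 (by norm_num)
  d3.items

-- ===== PORT B =====
-- B's helper: _dists(size) = [] if size < 2 else [1] + [2*d+1 for d in _dists(size // 2)]
def cdDists (size : Int) : List Int :=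
  if h : size < 2 then []
  else 1 :: (cdDists (PySem.Int.floordiv size 2)).map (fun d => 2 * d + 1)
termination_by size.toNat
decreasing_by
  rw [PySem.Int.floordiv_eq_ediv_of_pos (by norm_num)]; omega

-- the for-loops of B: for each table row insert every distance of _dists(size)
def compute_distances_alt (video_height : Int) (video_width : Int) (video_length : Int) :
    List (String × List (String × Int)) :=
  (([("h", "h_space", video_height), ("w", "w_space", video_width),
     ("t", "t_space", video_length)] : List (String × String × Int)).foldl
    (fun d t =>
      (cdDists t.2.2).foldl
        (fun acc v => acc.insert (t.1 ++ "_" ++ PySem.Int.toStr v) [(t.2.1, v)]) d)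
    PySem.Dict.empty).items

-- ===== PRECONDITION & SPEC =====
def Spec_compute_distances (video_height : Int) (video_width : Int) (video_length : Int) (out : List (String × List (String × Int))) : Prop := out = compute_distances_alt video_height video_width video_length
instance (video_height : Int) (video_width : Int) (video_length : Int) (out : List (String × List (String × Int))) : Decidable (Spec_compute_distances video_height video_width video_length out) := by unfold Spec_compute_distances; infer_instance

-- ===== CLAIM (what is proved, stated in full; the proofs are below) =====
def Claim_equal_compute_distances : Prop := ∀ (video_height : Int) (video_width : Int) (video_length : Int), Dom_compute_distances video_height video_width video_length → Spec_compute_distances video_height video_width video_length (compute_distances video_height video_width video_length)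

-- ===== LEMMAS AND PROOFS =====

lemma cdWhile_congr (size : Int) (pfx axis : String)
    (d : PySem.Dict String (List (String × Int))) {c1 c2 : Int} (h1 : 0 < c1)
    (e : c1 = c2) :
    cdWhile size pfx axis d c1 h1 = cdWhile size pfx axis d c2 (e ▸ h1) := by
  subst e; rfl

-- A's loop at cur = 2*c equals B's fold over cdDists (size // c), values stretched by c
lemma cdWhile_eq_fold (pfx axis : String) :
    ∀ (n : Nat) (size c : Int) (hc : 0 < c),
    (PySem.Int.floordiv size c).toNat ≤ n →
    ∀ (d : PySem.Dict String (List (String × Int))),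
    cdWhile size pfx axis d (2 * c) (by omega) =
      (cdDists (PySem.Int.floordiv size c)).foldl
        (fun acc v => acc.insert (pfx ++ "_" ++ PySem.Int.toStr (c * (v + 1) - 1))
          [(axis, c * (v + 1) - 1)]) d := by
  intro n
  induction n with
  | zero =>
    intro size c hc hn d
    have hq : PySem.Int.floordiv size c < 2 := by omega
    have hnotle : ¬ (2 * c ≤ size) := by
      intro hle
      exact absurd ((PySem.Int.le_floordiv_iff_mul_le hc).mpr hle) (by omega)
    rw [cdWhile, dif_neg hnotle, cdDists, dif_pos hq]
    rfl
  | succ n ih =>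
    intro size c hc hn d
    by_cases hq : PySem.Int.floordiv size c < 2
    · have hnotle : ¬ (2 * c ≤ size) := by
        intro hle
        exact absurd ((PySem.Int.le_floordiv_iff_mul_le hc).mpr hle) (by omega)
      rw [cdWhile, dif_neg hnotle, cdDists, dif_pos hq]
      rfl
    · have hle : 2 * c ≤ size := (PySem.Int.le_floordiv_iff_mul_le hc).mp (by omega)
      rw [cdWhile, dif_pos hle, cdDists, dif_neg hq, List.foldl_cons, List.foldl_map]
      have hkey : c * (1 + 1) - 1 = 2 * c - 1 := by ring
      have hdd : PySem.Int.floordiv (PySem.Int.floordiv size c) 2 =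
          PySem.Int.floordiv size (c * 2) := by
        rw [PySem.Int.floordiv_eq_ediv_of_pos hc,
            PySem.Int.floordiv_eq_ediv_of_pos (by norm_num : (0:Int) < 2),
            PySem.Int.floordiv_eq_ediv_of_pos (by positivity),
            Int.ediv_ediv_of_nonneg (by omega)]
      have hmeas : (PySem.Int.floordiv size (c * 2)).toNat ≤ n := by
        have h2 : PySem.Int.floordiv (PySem.Int.floordiv size c) 2 =
            (PySem.Int.floordiv size c) / 2 :=
          PySem.Int.floordiv_eq_ediv_of_pos (by norm_num)
        omega
      have hstep := ih size (c * 2) (by positivity) hmeas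
        (d.insert (pfx ++ "_" ++ PySem.Int.toStr (2 * c - 1)) [(axis, 2 * c - 1)])
      rw [cdWhile_congr _ _ _ _ _ (by ring : 2 * c * 2 = 2 * (c * 2))] at *
      rw [hkey, hstep, hdd]
      congr 1
      funext acc v
      have : c * (2 * v + 1 + 1) - 1 = c * 2 * (v + 1) - 1 := by ring
      rw [this]

-- specialisation c = 1: A's loop from 2 equals B's fold over cdDists size
lemma cdWhile_eq_cdDists (size : Int) (pfx axis : String)
    (d : PySem.Dict String (List (String × Int))) :
    cdWhile size pfx axis d 2 (by norm_num) =
      (cdDists size).foldl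
        (fun acc v => acc.insert (pfx ++ "_" ++ PySem.Int.toStr v) [(axis, v)]) d := by
  have h1 : PySem.Int.floordiv size 1 = size := by
    rw [PySem.Int.floordiv_eq_ediv_of_pos (by norm_num), Int.ediv_one]
  have h := cdWhile_eq_fold pfx axis (PySem.Int.floordiv size 1).toNat size 1
    (by norm_num) (le_refl _) d
  rw [cdWhile_congr _ _ _ _ _ (by ring : (2:Int) * 1 = 2)] at h
  rw [h, h1]
  congr 1
  funext acc v
  have : (1 : Int) * (v + 1) - 1 = v := by ring
  rw [this]

-- ===== VERDICT (by name: the statement is the Claim_ definition above) =====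
theorem compute_distances_spec : Claim_equal_compute_distances := by
  intro h w l _
  unfold Spec_compute_distances compute_distances compute_distances_alt
  simp only [List.foldl_cons, List.foldl_nil]
  rw [cdWhile_eq_cdDists, cdWhile_eq_cdDists, cdWhile_eq_cdDists]
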